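-- pv_equiv track=rewrite | github.com/nicojapas/foldy | src/nlp.py | _analyze_separator_patterns
-- ===== SOURCE A (Python) =====
-- def _analyze_separator_patterns(folder_names):
--     """Analyze separator patterns in folder names"""
--     separator_patterns = {
--         'underscore': [],
--         'hyphen': [],
--         'space': [],
--         'no_separator': [],
--         'mixed': []
--     }
--
--     for name in folder_names:
--         underscore_count = name.count('_')
--         hyphen_count = name.count('-')
--         space_count = name.count(' ')
--
--         if underscore_count > 0 and hyphen_count == 0 and space_count == 0:
--             separator_patterns['underscore'].append(name)
--         elif hyphen_count > 0 and underscore_count == 0 and space_count == 0: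
--             separator_patterns['hyphen'].append(name)
--         elif space_count > 0 and underscore_count == 0 and hyphen_count == 0:
--             separator_patterns['space'].append(name)
--         elif underscore_count == 0 and hyphen_count == 0 and space_count == 0:
--             separator_patterns['no_separator'].append(name)
--         else:
--             separator_patterns['mixed'].append(name)
--
--     # Remove empty pattern groups
--     return {k: v for k, v in separator_patterns.items() if v}
-- ===== SOURCE B (Python) =====
-- _SEP_NAMES = {'_': 'underscore', '-': 'hyphen', ' ': 'space'}
--
--
-- def _classify(name):
--     present = [s for s in ('_', '-', ' ') if name.count(s) > 0]
--     if len(present) == 0: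
--         return 'no_separator'
--     if len(present) == 1:
--         return _SEP_NAMES[present[0]]
--     return 'mixed'
--
--
-- def _analyze_separator_patterns(folder_names):
--     result = {}
--     for key in ('underscore', 'hyphen', 'space', 'no_separator', 'mixed'):
--         group = [n for n in folder_names if _classify(n) == key]
--         if group:
--             result[key] = group
--     return result
-- ===== Notes on version B (the rewrite author's own statement) =====
-- stated objective: simpler
-- what changed: Replaces A's mutable five-bucket dict filled by a four-way if/elif chain on three counts with a small classification function (separators present in the name) plus one filter pass per category, building the result dict directly in category order.
import Mathlib
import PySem

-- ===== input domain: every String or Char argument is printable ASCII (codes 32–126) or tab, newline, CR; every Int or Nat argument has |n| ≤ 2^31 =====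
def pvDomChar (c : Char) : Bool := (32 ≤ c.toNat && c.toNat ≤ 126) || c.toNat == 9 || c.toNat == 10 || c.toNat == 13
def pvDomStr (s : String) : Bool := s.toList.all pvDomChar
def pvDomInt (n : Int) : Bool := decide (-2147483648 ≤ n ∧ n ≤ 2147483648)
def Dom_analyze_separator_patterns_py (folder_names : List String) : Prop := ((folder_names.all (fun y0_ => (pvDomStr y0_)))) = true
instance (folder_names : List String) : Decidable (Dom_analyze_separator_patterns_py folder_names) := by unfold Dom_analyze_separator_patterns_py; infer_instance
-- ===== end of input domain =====

-- B replaces A's mutable five-bucket dict and if/elif chain with a classification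
-- function plus one filter per category (objective: simpler decomposition; same result).

-- ===== PORT A =====
-- separator_patterns, a dict with five fixed keys, ported as a record of five lists
structure PvSepPat where
  underscore : List String
  hyphen : List String
  space : List String
  no_separator : List String
  mixed : List String
deriving Repr, DecidableEq

def pvStepA (p : PvSepPat) (name : String) : PvSepPat :=
  let underscore_count := PySem.Str.count name "_"
  let hyphen_count := PySem.Str.count name "-"
  let space_count := PySem.Str.count name " "
  if underscore_count > 0 ∧ hyphen_count = 0 ∧ space_count = 0 then
    { p with underscore := p.underscore ++ [name] }
  else if hyphen_count > 0 ∧ underscore_count = 0 ∧ space_count = 0 then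
    { p with hyphen := p.hyphen ++ [name] }
  else if space_count > 0 ∧ underscore_count = 0 ∧ hyphen_count = 0 then
    { p with space := p.space ++ [name] }
  else if underscore_count = 0 ∧ hyphen_count = 0 ∧ space_count = 0 then
    { p with no_separator := p.no_separator ++ [name] }
  else
    { p with mixed := p.mixed ++ [name] }

def analyze_separator_patterns_py (folder_names : List String) : List (String × List String) :=
  let p := folder_names.foldl pvStepA ⟨[], [], [], [], []⟩
  -- {k: v for k, v in separator_patterns.items() if v}
  ([("underscore", p.underscore), ("hyphen", p.hyphen), ("space", p.space),
    ("no_separator", p.no_separator), ("mixed", p.mixed)]).filter (fun kv => kv.2 ≠ [])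

-- ===== PORT B =====
def pvSepNames : PySem.Dict String String := PySem.Dict.ofList [("_", "underscore"), ("-", "hyphen"), (" ", "space")]

def pvClassify (name : String) : String :=
  let present := (["_", "-", " "]).filter (fun s => PySem.Str.count name s > 0)
  if present.length = 0 then "no_separator"
  else if present.length = 1 then PySem.Dict.getD pvSepNames (present.headD "") ""
  else "mixed"

def analyze_separator_patterns_py_alt (folder_names : List String) : List (String × List String) :=
  (["underscore", "hyphen", "space", "no_separator", "mixed"]).foldl
    (fun result key =>
      let group := folder_names.filter (fun n => pvClassify n = key)
      if group.isEmpty then result else result ++ [(key, group)]) []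

-- ===== PRECONDITION & SPEC =====
def Spec_analyze_separator_patterns_py (folder_names : List String) (out : List (String × List String)) : Prop := out = analyze_separator_patterns_py_alt folder_names
instance (folder_names : List String) (out : List (String × List String)) : Decidable (Spec_analyze_separator_patterns_py folder_names out) := by unfold Spec_analyze_separator_patterns_py; infer_instance

-- ===== CLAIM (what is proved, stated in full; the proofs are below) =====
def Claim_equal_analyze_separator_patterns_py : Prop := ∀ (folder_names : List String), Dom_analyze_separator_patterns_py folder_names → Spec_analyze_separator_patterns_py folder_names (analyze_separator_patterns_py folder_names)

-- ===== LEMMAS AND PROOFS =====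

-- pvClassify as an explicit table of the three separator-presence tests
def pvKey (a b c : Bool) : String :=
  match a, b, c with
  | true, false, false => "underscore"
  | false, true, false => "hyphen"
  | false, false, true => "space"
  | false, false, false => "no_separator"
  | _, _, _ => "mixed"

theorem pvClassify_eq (n : String) :
    pvClassify n = pvKey (PySem.Str.count n "_" > 0) (PySem.Str.count n "-" > 0)
      (PySem.Str.count n " " > 0) := by
  by_cases hu : PySem.Str.count n "_" > 0 <;>
    by_cases hh : PySem.Str.count n "-" > 0 <;>
      by_cases hs : PySem.Str.count n " " > 0 <;>
        simp_all [pvClassify, pvKey, pvSepNames] <;> decide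

-- A's fold result, field by field, is B's per-category filter
theorem pv_fold_eq (l : List String) (p : PvSepPat) :
    l.foldl pvStepA p =
      ⟨p.underscore ++ l.filter (fun n => pvClassify n = "underscore"),
       p.hyphen ++ l.filter (fun n => pvClassify n = "hyphen"),
       p.space ++ l.filter (fun n => pvClassify n = "space"),
       p.no_separator ++ l.filter (fun n => pvClassify n = "no_separator"),
       p.mixed ++ l.filter (fun n => pvClassify n = "mixed")⟩ := by
  induction l generalizing p with
  | nil => simp
  | cons n l ih =>
    rw [List.foldl_cons, ih]
    simp only [List.filter_cons, pvClassify_eq n]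
    by_cases hu : PySem.Str.count n "_" > 0 <;>
      by_cases hh : PySem.Str.count n "-" > 0 <;>
        by_cases hs : PySem.Str.count n " " > 0 <;>
          simp_all [pvStepA, pvKey, Nat.pos_iff_ne_zero]

-- B's foldl over the five keys, as a flatMap of per-key segments
def pvSeg (folder_names : List String) (key : String) : List (String × List String) :=
  let group := folder_names.filter (fun n => pvClassify n = key)
  if group.isEmpty then [] else [(key, group)]

theorem pv_alt_eq_flatMap (fn : List String) :
    analyze_separator_patterns_py_alt fn =
      (["underscore", "hyphen", "space", "no_separator", "mixed"]).flatMap (pvSeg fn) := by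
  rw [analyze_separator_patterns_py_alt]
  have h : (fun (result : List (String × List String)) key =>
      let group := fn.filter (fun n => pvClassify n = key)
      if group.isEmpty then result else result ++ [(key, group)]) =
      fun result key => result ++ pvSeg fn key := by
    funext acc key
    simp only [pvSeg]
    split <;> simp
  rw [h, PySem.List.foldl_append_eq_flatMap, List.nil_append]

theorem analyze_separator_patterns_py_spec : Claim_equal_analyze_separator_patterns_py := by
  intro folder_names _
  show _ = _
  rw [analyze_separator_patterns_py, pv_fold_eq, pv_alt_eq_flatMap]
  simp only [List.flatMap_cons, List.flatMap_nil, List.filter_cons, List.filter_nil,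
    List.nil_append, List.append_nil, pvSeg]
  generalize folder_names.filter (fun n => pvClassify n = "underscore") = g1
  generalize folder_names.filter (fun n => pvClassify n = "hyphen") = g2
  generalize folder_names.filter (fun n => pvClassify n = "space") = g3
  generalize folder_names.filter (fun n => pvClassify n = "no_separator") = g4
  generalize folder_names.filter (fun n => pvClassify n = "mixed") = g5
  by_cases h1 : g1 = [] <;> by_cases h2 : g2 = [] <;> by_cases h3 : g3 = [] <;>
    by_cases h4 : g4 = [] <;> by_cases h5 : g5 = [] <;>
      simp [h1, h2, h3, h4, h5, List.isEmpty_iff]
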